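-- pv_equiv track=rewrite | github.com/vishalbelsare/discopt | python/discopt/_jax/milp_relaxation.py | _choose_trilinear_pair
-- ===== SOURCE A (Python) =====
-- def _choose_trilinear_pair(
--     term: tuple[int, int, int],
--     partitioned_vars: set[int],
-- ) -> tuple[tuple[int, int], int]:
--     """Choose a deterministic trilinear decomposition pair.
--
--     Prefer a pair that includes as many currently partitioned original variables as
--     possible so the first or second lifted bilinear term can reuse the stronger
--     piecewise relaxation machinery already present for bilinear terms.
--     """
--     i, j, k = tuple(sorted(term))
--     candidates = [((i, j), k), ((i, k), j), ((j, k), i)]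
--     candidates.sort()
--     return max(
--         candidates,
--         key=lambda item: (
--             sum(v in partitioned_vars for v in item[0]),
--             item[0][0] in partitioned_vars or item[0][1] in partitioned_vars,
--         ),
--     )
-- ===== SOURCE B (Python) =====
-- def _choose_trilinear_pair(
--     term: tuple[int, int, int],
--     partitioned_vars: set[int],
-- ) -> tuple[tuple[int, int], int]:
--     """Pick the bilinear pair by excluding the largest non-partitioned variable
--     (falling back to the largest variable when all three are partitioned)."""
--     i, j, k = sorted(term)
--     if k not in partitioned_vars:
--         return ((i, j), k)
--     if j not in partitioned_vars:
--         return ((i, k), j)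
--     if i not in partitioned_vars:
--         return ((j, k), i)
--     return ((i, j), k)
-- ===== Notes on version B (the rewrite author's own statement) =====
-- stated objective: simpler
-- what changed: B drops A's candidate-list construction, lexicographic sort and keyed max entirely: after sorting the three variables it decides the pair by three direct membership tests, excluding the largest non-partitioned variable and falling back to k when all are partitioned.
import Mathlib
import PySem

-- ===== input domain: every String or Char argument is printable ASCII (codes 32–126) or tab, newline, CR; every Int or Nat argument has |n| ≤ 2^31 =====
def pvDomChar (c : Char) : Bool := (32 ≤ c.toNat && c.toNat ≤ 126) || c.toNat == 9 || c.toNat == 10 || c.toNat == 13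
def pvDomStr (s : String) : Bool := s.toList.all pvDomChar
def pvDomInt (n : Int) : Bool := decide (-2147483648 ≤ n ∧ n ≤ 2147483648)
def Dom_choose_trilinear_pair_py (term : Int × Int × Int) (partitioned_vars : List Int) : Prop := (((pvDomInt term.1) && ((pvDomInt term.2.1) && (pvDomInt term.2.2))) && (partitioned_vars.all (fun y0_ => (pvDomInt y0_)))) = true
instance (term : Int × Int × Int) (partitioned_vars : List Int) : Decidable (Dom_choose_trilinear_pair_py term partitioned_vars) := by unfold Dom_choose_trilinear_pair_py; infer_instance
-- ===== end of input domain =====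

-- B replaces A's candidate-list construction, sort and keyed max by three direct
-- membership branches (exclude the largest non-partitioned variable, else k): simpler.

-- ===== PORT A =====
-- Python's lexicographic '<' on the tuple ((Int, Int), Int) (exact: Python compares
-- tuples componentwise left to right); PySem has no lex order on nested pairs.
def pyLtCand (x y : (Int × Int) × Int) : Bool :=
  if x.1.1 = y.1.1 then
    if x.1.2 = y.1.2 then decide (x.2 < y.2)
    else decide (x.1.2 < y.1.2)
  else decide (x.1.1 < y.1.1)

def choose_trilinear_pair_py (term : Int × Int × Int) (partitioned_vars : List Int) : (Int × Int) × Int :=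
  -- i, j, k = tuple(sorted(term))  (sorted of a 3-tuple always has 3 elements)
  match PySem.List.sorted [term.1, term.2.1, term.2.2] (fun x => x) false with
  | [i, j, k] =>
      let candidates : List ((Int × Int) × Int) := [((i, j), k), ((i, k), j), ((j, k), i)]
      -- candidates.sort(): PySem's stable insertion sort with Python's tuple '<' (exact)
      let sortedCands := candidates.foldl (fun acc x => PySem.List.insertBy pyLtCand x acc) []
      -- max(..., key=lambda item: (sum(...), ... or ...)): tuple key → max2?
      (PySem.List.max2? sortedCands
        (fun item => (if partitioned_vars.contains item.1.1 then (1 : Int) else 0) +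
                     (if partitioned_vars.contains item.1.2 then 1 else 0))
        (fun item => partitioned_vars.contains item.1.1 || partitioned_vars.contains item.1.2)).getD ((0, 0), 0)
  | _ => ((0, 0), 0)  -- unreachable: sorted of a 3-list has 3 elements

-- ===== PORT B =====
def choose_trilinear_pair_py_alt (term : Int × Int × Int) (partitioned_vars : List Int) : (Int × Int) × Int :=
  -- i, j, k = sorted(term): unpack the 3-element sorted list positionally
  let s := PySem.List.sorted [term.1, term.2.1, term.2.2] (fun x => x) false
  let i := s.getD 0 0
  let j := s.getD 1 0
  let k := s.getD 2 0
  if partitioned_vars.contains k = false then ((i, j), k)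
  else if partitioned_vars.contains j = false then ((i, k), j)
  else if partitioned_vars.contains i = false then ((j, k), i)
  else ((i, j), k)

-- ===== PRECONDITION & SPEC =====
def Spec_choose_trilinear_pair_py (term : Int × Int × Int) (partitioned_vars : List Int) (out : (Int × Int) × Int) : Prop := out = choose_trilinear_pair_py_alt term partitioned_vars
instance (term : Int × Int × Int) (partitioned_vars : List Int) (out : (Int × Int) × Int) : Decidable (Spec_choose_trilinear_pair_py term partitioned_vars out) := by unfold Spec_choose_trilinear_pair_py; infer_instance

-- ===== CLAIM (what is proved, stated in full; the proofs are below) =====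
def Claim_equal_choose_trilinear_pair_py : Prop := ∀ (term : Int × Int × Int) (partitioned_vars : List Int), Dom_choose_trilinear_pair_py term partitioned_vars → Spec_choose_trilinear_pair_py term partitioned_vars (choose_trilinear_pair_py term partitioned_vars)

-- ===== LEMMAS AND PROOFS =====

-- sorted of a 3-element list: an ordered 3-element list
theorem sorted3 (a b c : Int) :
    ∃ i j k, i ≤ j ∧ j ≤ k ∧
      PySem.List.sorted [a, b, c] (fun x => x) false = [i, j, k] := by
  rcases le_total a b with hab | hab <;> rcases le_total b c with hbc | hbc <;>
    rcases le_total a c with hac | hac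
  · exact ⟨a, b, c, by omega, by omega, PySem.List.sorted_id_eq_of_perm_of_pairwise _ _ (List.Perm.refl _) (by simp <;> omega)⟩
  · exact ⟨a, b, c, by omega, by omega, PySem.List.sorted_id_eq_of_perm_of_pairwise _ _ (List.Perm.refl _) (by simp <;> omega)⟩
  · exact ⟨a, c, b, by omega, by omega, PySem.List.sorted_id_eq_of_perm_of_pairwise _ _ ((List.Perm.swap b c []).cons a) (by simp <;> omega)⟩
  · exact ⟨c, a, b, by omega, by omega, PySem.List.sorted_id_eq_of_perm_of_pairwise _ _ ((List.Perm.swap a c [b]).trans ((List.Perm.swap b c []).cons a)) (by simp <;> omega)⟩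
  · exact ⟨b, a, c, by omega, by omega, PySem.List.sorted_id_eq_of_perm_of_pairwise _ _ (List.Perm.swap a b [c]) (by simp <;> omega)⟩
  · exact ⟨b, c, a, by omega, by omega, PySem.List.sorted_id_eq_of_perm_of_pairwise _ _ (((List.Perm.swap a c []).cons b).trans (List.Perm.swap a b [c])) (by simp <;> omega)⟩
  · exact ⟨c, b, a, by omega, by omega, PySem.List.sorted_id_eq_of_perm_of_pairwise _ _ ((List.Perm.swap b c [a]).trans (((List.Perm.swap a c []).cons b).trans (List.Perm.swap a b [c]))) (by simp <;> omega)⟩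
  · exact ⟨c, b, a, by omega, by omega, PySem.List.sorted_id_eq_of_perm_of_pairwise _ _ ((List.Perm.swap b c [a]).trans (((List.Perm.swap a c []).cons b).trans (List.Perm.swap a b [c]))) (by simp <;> omega)⟩

theorem core_eq (i j k : Int) (P : List Int) (hij : i ≤ j) (hjk : j ≤ k) :
    (PySem.List.max2?
        (([((i, j), k), ((i, k), j), ((j, k), i)] : List ((Int × Int) × Int)).foldl
          (fun acc x => PySem.List.insertBy pyLtCand x acc) [])
        (fun item => (if P.contains item.1.1 then (1 : Int) else 0) +
                     (if P.contains item.1.2 then 1 else 0))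
        (fun item => P.contains item.1.1 || P.contains item.1.2)).getD ((0, 0), 0)
      = (if P.contains k = false then ((i, j), k)
         else if P.contains j = false then ((i, k), j)
         else if P.contains i = false then ((j, k), i)
         else ((i, j), k)) := by
  rcases eq_or_lt_of_le hij with hij' | hij' <;>
  rcases eq_or_lt_of_le hjk with hjk' | hjk' <;>
  rcases hpi : P.contains i with _ | _ <;>
  rcases hpj : P.contains j with _ | _ <;>
  rcases hpk : P.contains k with _ | _ <;>
  simp_all [PySem.List.insertBy, PySem.List.max2?, pyLtCand,
    show ¬ k < j by omega, show ¬ j < i by omega, show ¬ k < i by omega]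

-- ===== VERDICT (by name: the statement is the Claim_ definition above) =====
theorem choose_trilinear_pair_py_spec : Claim_equal_choose_trilinear_pair_py := by
  intro term P _
  unfold Spec_choose_trilinear_pair_py choose_trilinear_pair_py choose_trilinear_pair_py_alt
  obtain ⟨i, j, k, hij, hjk, hs⟩ := sorted3 term.1 term.2.1 term.2.2
  rw [hs]
  exact core_eq i j k P hij hjk
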